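-- pv_equiv track=rewrite | github.com/julien-soulier/adventofcode | 2020/star 20/star20.py | get_index_list
-- ===== SOURCE A (Python) =====
-- def get_index_list(right_side, size):
--     if right_side==3: #OK
--         return [(x,y) for y in range(size) for x in range(size)]
--     elif right_side==1: #OK
--         return [(x,y) for x in range(size) for y in range(size)]
--     elif right_side==6:
--         return [(x,y) for y in range(size-1,-1,-1) for x in range(size-1,-1,-1)]
--     elif right_side==0: #OK
--         return [(x,y) for x in range(size) for y in range(size-1,-1,-1)]
--         #######
--     elif right_side==2: #OK
--         return [(x,y) for y in range(size) for x in range(size-1,-1,-1)]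
--     elif right_side==4: #OK
--         return [(x,y) for x in range(size-1,-1,-1) for y in range(size-1,-1,-1)]
--     elif right_side==7: #OK
--         return [(x,y) for y in range(size-1,-1,-1) for x in range(size)]
--     elif right_side==5: #OK
--         return [(x,y) for x in range(size-1,-1,-1) for y in range(size)]
-- ===== SOURCE B (Python) =====
-- def get_index_list(right_side, size):
--     # Unknown orientation: nothing to emit.
--     if right_side not in (0, 1, 2, 3, 4, 5, 6, 7):
--         return None
--     # Build one canonical row-major list via a single flat loop with divmod,
--     # then derive the requested orientation as a geometric transform
--     # (coordinate swap, list reversal, or coordinate flip k -> m-k).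
--     base = []
--     if size > 0:
--         for k in range(size * size):
--             y, x = divmod(k, size)
--             base.append((x, y))
--     m = size - 1
--     if right_side == 3:
--         return base
--     if right_side == 1:
--         return [(y, x) for (x, y) in base]
--     if right_side == 6:
--         return list(reversed(base))
--     if right_side == 4:
--         return list(reversed([(y, x) for (x, y) in base]))
--     if right_side == 7:
--         return [(x, m - y) for (x, y) in base]
--     if right_side == 2:
--         return [(m - x, y) for (x, y) in base]
--     if right_side == 0:
--         return [(y, m - x) for (x, y) in base]
--     return [(m - y, x) for (x, y) in base]  # right_side == 5
-- ===== Notes on version B (the rewrite author's own statement) =====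
-- stated objective: alternative
-- what changed: Instead of eight separate nested comprehensions, B builds one canonical row-major list with a single flat divmod loop over size*size and derives each orientation from it by a geometric transform (coordinate swap, list reversal, or coordinate flip m-k).
-- outside the precondition, e.g. on get_index_list(8, 2): A returns None, B returns None; on get_index_list(-1, 3): A returns None, B returns None
import Mathlib
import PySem

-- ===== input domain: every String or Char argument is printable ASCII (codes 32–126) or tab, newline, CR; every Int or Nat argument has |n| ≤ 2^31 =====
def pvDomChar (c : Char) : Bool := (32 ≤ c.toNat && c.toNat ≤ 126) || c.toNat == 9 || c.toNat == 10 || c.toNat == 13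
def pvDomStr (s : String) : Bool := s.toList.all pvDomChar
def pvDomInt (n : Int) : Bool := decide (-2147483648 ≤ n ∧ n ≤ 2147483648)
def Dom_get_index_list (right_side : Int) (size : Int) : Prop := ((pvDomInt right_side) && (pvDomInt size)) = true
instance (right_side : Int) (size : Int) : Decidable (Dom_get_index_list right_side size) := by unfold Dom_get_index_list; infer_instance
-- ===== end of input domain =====

-- B builds one canonical row-major list with a flat divmod loop and derives each
-- orientation from it by a swap / reverse / flip transform (objective: alternative).


-- ===== PORT A =====
def get_index_list (right_side : Int) (size : Int) : List (Int × Int) :=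
  if right_side == 3 then
    (PySem.List.pyRange 0 size 1).flatMap (fun y => (PySem.List.pyRange 0 size 1).map (fun x => (x, y)))
  else if right_side == 1 then
    (PySem.List.pyRange 0 size 1).flatMap (fun x => (PySem.List.pyRange 0 size 1).map (fun y => (x, y)))
  else if right_side == 6 then
    (PySem.List.pyRange (size-1) (-1) (-1)).flatMap (fun y => (PySem.List.pyRange (size-1) (-1) (-1)).map (fun x => (x, y)))
  else if right_side == 0 then
    (PySem.List.pyRange 0 size 1).flatMap (fun x => (PySem.List.pyRange (size-1) (-1) (-1)).map (fun y => (x, y)))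
  else if right_side == 2 then
    (PySem.List.pyRange 0 size 1).flatMap (fun y => (PySem.List.pyRange (size-1) (-1) (-1)).map (fun x => (x, y)))
  else if right_side == 4 then
    (PySem.List.pyRange (size-1) (-1) (-1)).flatMap (fun x => (PySem.List.pyRange (size-1) (-1) (-1)).map (fun y => (x, y)))
  else if right_side == 7 then
    (PySem.List.pyRange (size-1) (-1) (-1)).flatMap (fun y => (PySem.List.pyRange 0 size 1).map (fun x => (x, y)))
  else if right_side == 5 then
    (PySem.List.pyRange (size-1) (-1) (-1)).flatMap (fun x => (PySem.List.pyRange 0 size 1).map (fun y => (x, y)))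
  else [] -- Python A falls through and returns None here; Pre_ excludes these inputs

-- ===== PORT B =====
-- the flat divmod loop of Source B (append in a loop = foldl with append)
def glBase (size : Int) : List (Int × Int) :=
  if size > 0 then
    (PySem.List.pyRange 0 (size*size) 1).foldl
      (fun acc k =>
        let y := PySem.Int.floordiv k size
        let x := PySem.Int.mod k size
        acc ++ [(x, y)]) []
  else []

def get_index_list_alt (right_side : Int) (size : Int) : List (Int × Int) :=
  if ¬(right_side = 0 ∨ right_side = 1 ∨ right_side = 2 ∨ right_side = 3 ∨ right_side = 4 ∨
       right_side = 5 ∨ right_side = 6 ∨ right_side = 7) then [] -- Python B returns None here; Pre_ excludes these inputs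
  else
  let base := glBase size
  let m := size - 1
  if right_side == 3 then base
  else if right_side == 1 then base.map (fun p => (p.2, p.1))
  else if right_side == 6 then base.reverse
  else if right_side == 4 then (base.map (fun p => (p.2, p.1))).reverse
  else if right_side == 7 then base.map (fun p => (p.1, m - p.2))
  else if right_side == 2 then base.map (fun p => (m - p.1, p.2))
  else if right_side == 0 then base.map (fun p => (p.2, m - p.1))
  else base.map (fun p => (m - p.2, p.1)) -- right_side == 5

-- ===== PRECONDITION & SPEC =====
-- Pre_ excludes right_side outside 0..7, where Python A falls through all branches and
-- returns None (not a list of pairs); B likewise returns None there.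
def Pre_get_index_list (right_side : Int) (size : Int) : Prop := 0 ≤ right_side ∧ right_side < 8
instance (right_side : Int) (size : Int) : Decidable (Pre_get_index_list right_side size) := by unfold Pre_get_index_list; infer_instance
def pvWitness_get_index_list : Int × Int := (3, 2)

def Spec_get_index_list (right_side : Int) (size : Int) (out : List (Int × Int)) : Prop := out = get_index_list_alt right_side size
instance (right_side : Int) (size : Int) (out : List (Int × Int)) : Decidable (Spec_get_index_list right_side size out) := by unfold Spec_get_index_list; infer_instance

-- ===== CLAIM (what is proved, stated in full; the proofs are below) =====
def Claim_equal_get_index_list : Prop := ∀ (right_side : Int) (size : Int), Dom_get_index_list right_side size → Pre_get_index_list right_side size → Spec_get_index_list right_side size (get_index_list right_side size)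

-- ===== LEMMAS AND PROOFS =====

-- nested loop over an m×n grid = one flat loop over m*n positions read back by divmod
theorem pv_flat (n : Nat) {α : Type} (f : Nat → Nat → α) :
    ∀ (m : Nat), (List.range (m*n)).map (fun k => f (k / n) (k % n))
      = (List.range m).flatMap (fun o => (List.range n).map (fun i => f o i)) := by
  intro m
  induction m with
  | zero => simp
  | succ m ih =>
    have h1 : (m+1)*n = m*n + n := by ring
    rw [h1, List.range_add, List.map_append, ih, List.range_succ, List.flatMap_append]
    simp only [List.flatMap_singleton, List.map_map]
    congr 1
    apply List.map_congr_left
    intro i hi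
    have hin : i < n := List.mem_range.mp hi
    have hd : (m * n + i) / n = m := by
      rw [Nat.mul_comm m n, Nat.mul_add_div (by omega : 0 < n), Nat.div_eq_of_lt hin]; omega
    have hm : (m * n + i) % n = i := by
      rw [Nat.mul_comm m n, Nat.mul_add_mod, Nat.mod_eq_of_lt hin]
    simp [Function.comp, hd, hm]

-- reversing a map over range
theorem pv_rev {α : Type} (N : Nat) (f : Nat → α) :
    ((List.range N).map f).reverse = (List.range N).map (fun k => f (N - 1 - k)) := by
  apply List.ext_getElem
  · simp
  · intro i h1 h2
    simp only [List.getElem_reverse, List.length_map, List.length_range, List.getElem_map,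
      List.getElem_range]

-- base as a flat map over range (n*n)
theorem pv_base (n : Nat) (hn : 0 < n) :
    glBase (n : Int) = (List.range (n*n)).map (fun k => (((k % n : Nat) : Int), ((k / n : Nat) : Int))) := by
  unfold glBase
  rw [if_pos (by exact_mod_cast hn)]
  have : ((n:Int) * (n:Int)) = ((n*n : Nat) : Int) := by push_cast; ring
  rw [this, PySem.List.foldl_append_singleton_eq_map, PySem.List.pyRange_one]
  simp only [sub_zero, Int.toNat_natCast, List.map_map]
  apply List.map_congr_left
  intro k _
  simp [Function.comp, PySem.Int.floordiv_natCast, PySem.Int.mod_natCast]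

-- the ascending and descending ranges as maps over List.range
theorem pv_asc (n : Nat) : PySem.List.pyRange 0 (n : Int) 1 = (List.range n).map (fun (k : Nat) => (k : Int)) := by
  rw [PySem.List.pyRange_one]
  simp only [sub_zero, Int.toNat_natCast]
  apply List.map_congr_left
  intro k _
  omega

theorem pv_desc (n : Nat) :
    PySem.List.pyRange ((n:Int) - 1) (-1) (-1) = (List.range n).map (fun (k : Nat) => ((n:Int) - 1 - (k : Int))) := by
  rw [PySem.List.pyRange_neg_one]
  have h : ((n:Int) - 1 - (-1)).toNat = n := by omega
  rw [h]

-- complement arithmetic: position n*n-1-k splits as the flipped (row, column)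
theorem pv_split (n k : Nat) (hn : 0 < n) (hkN : k < n*n) :
    n*n - 1 - k = (n - 1 - k/n) * n + (n - 1 - k%n) := by
  have hq : k / n < n := Nat.div_lt_iff_lt_mul hn |>.mpr hkN
  have hr : k % n < n := Nat.mod_lt _ hn
  have hky : n * (k / n) + k % n = k := Nat.div_add_mod k n
  generalize hqd : k / n = q at *
  generalize hrd : k % n = r at *
  have h1 : 1 ≤ n*n := by nlinarith
  zify [h1, show k ≤ n*n - 1 by omega, hn, show q ≤ n-1 by omega, show r ≤ n-1 by omega]
  have hky' : (n:ℤ) * q + r = k := by exact_mod_cast hky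
  linear_combination hky'

-- ===== VERDICT (by name: the statement is the Claim_ definition above) =====
theorem get_index_list_spec : Claim_equal_get_index_list := by
  intro rs size _ hpre
  unfold Spec_get_index_list
  rcases (by omega : size ≤ 0 ∨ 0 < size) with hs | hs
  · -- size ≤ 0: every range is empty and base is empty; all branches give []
    have h1 : PySem.List.pyRange 0 size 1 = [] := PySem.List.pyRange_one_eq_nil (by omega)
    have h2 : PySem.List.pyRange (size-1) (-1) (-1) = [] := PySem.List.pyRange_neg_one_eq_nil (by omega)
    have h3 : glBase size = [] := by unfold glBase; rw [if_neg (by omega)]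
    unfold get_index_list get_index_list_alt
    obtain ⟨h0, h8⟩ := hpre
    have hrs : rs = 0 ∨ rs = 1 ∨ rs = 2 ∨ rs = 3 ∨ rs = 4 ∨ rs = 5 ∨ rs = 6 ∨ rs = 7 := by omega
    rcases hrs with rfl | rfl | rfl | rfl | rfl | rfl | rfl | rfl <;> simp [h1, h2, h3]
  · -- size > 0: write size = ↑n and reduce every branch to a map over range (n*n)
    obtain ⟨n, rfl⟩ : ∃ n : Nat, size = (n : Int) := ⟨size.toNat, by omega⟩
    have hn : 0 < n := by exact_mod_cast hs
    obtain ⟨h0, h8⟩ := hpre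
    have hb := pv_base n hn
    have hrs : rs = 0 ∨ rs = 1 ∨ rs = 2 ∨ rs = 3 ∨ rs = 4 ∨ rs = 5 ∨ rs = 6 ∨ rs = 7 := by omega
    unfold get_index_list get_index_list_alt
    rcases hrs with rfl | rfl | rfl | rfl | rfl | rfl | rfl | rfl <;>
      simp only [hb, pv_asc, pv_desc, List.flatMap_map, List.map_map,
        ← pv_flat, pv_rev, beq_iff_eq, reduceIte, List.map_map, if_neg, not_true_eq_false,
        Int.reduceEq, or_self, or_true, not_false_eq_true, or_false] <;>
      (apply List.map_congr_left;
       intro k hk;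
       have hkN : k < n * n := List.mem_range.mp hk;
       have hq : k / n < n := Nat.div_lt_iff_lt_mul hn |>.mpr hkN;
       have hr : k % n < n := Nat.mod_lt _ hn;
       have hc : (n*n - 1 - k) / n = n - 1 - k / n ∧ (n*n - 1 - k) % n = n - 1 - k % n := by
         rw [pv_split n k hn hkN, Nat.mul_comm (n - 1 - k / n) n]
         exact ⟨by rw [Nat.mul_add_div hn, Nat.div_eq_of_lt (show n - 1 - k % n < n by omega)]; omega,
                by rw [Nat.mul_add_mod, Nat.mod_eq_of_lt (show n - 1 - k % n < n by omega)]⟩;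
       simp [Function.comp, hc.1, hc.2];
       try (push_cast [Nat.sub_sub]; omega))
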